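-- pv_equiv track=rewrite | github.com/ccqaofficial/ccqa_official | CCQA_all_process.py | check_lcv_condition
-- ===== SOURCE A (Python) =====
-- from collections import Counter
-- from typing import List, Dict, Any, Optional
--
-- def check_lcv_condition(answers: List[str], n_solutions: int) -> bool:
--     """
--     Check if Low Confidence Voting condition is met
--     LCV condition from paper: max_j freq(A_j) < ⌈N/2⌉
--     """
--     if not answers:
--         return True
--
--     # Count frequency of each answer
--     answer_counts = Counter(ans for ans in answers if ans is not None)
--     if not answer_counts:
--         return True
--
--     # Get the most frequent answer
--     max_count = answer_counts.most_common(1)[0][1]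
--
--     # LCV condition: max frequency < ceil(N/2)
--     return max_count < (n_solutions + 1) // 2
-- ===== SOURCE B (Python) =====
-- def check_lcv_condition(answers, n_solutions):
--     """Sort-and-scan variant: max answer frequency = longest run of equal
--     consecutive elements in the sorted list; no Counter hash table."""
--     if not answers:
--         return True
--     vals = sorted(answers)
--     run = best = 1
--     for prev, cur in zip(vals, vals[1:]):
--         run = run + 1 if cur == prev else 1
--         if run > best:
--             best = run
--     return best < (n_solutions + 1) // 2
-- ===== Notes on version B (the rewrite author's own statement) =====
-- stated objective: alternative
-- what changed: Replaces the Counter hash table and most_common(1) with sorting the answers and a single linear scan tracking the longest run of equal consecutive elements (the None filter is vacuous on lists of strings).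
import Mathlib
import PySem

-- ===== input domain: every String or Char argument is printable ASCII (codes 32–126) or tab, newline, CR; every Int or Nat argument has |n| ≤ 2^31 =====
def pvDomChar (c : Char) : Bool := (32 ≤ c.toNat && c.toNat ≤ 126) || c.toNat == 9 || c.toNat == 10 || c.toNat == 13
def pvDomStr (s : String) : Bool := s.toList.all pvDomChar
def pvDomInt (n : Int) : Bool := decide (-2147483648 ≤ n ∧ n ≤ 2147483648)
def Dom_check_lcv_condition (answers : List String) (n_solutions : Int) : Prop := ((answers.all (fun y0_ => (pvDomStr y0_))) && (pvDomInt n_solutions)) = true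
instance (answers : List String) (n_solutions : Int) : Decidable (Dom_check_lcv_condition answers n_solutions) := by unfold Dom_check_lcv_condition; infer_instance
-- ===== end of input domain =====

-- B replaces A's Counter/most_common with sort + longest-run-of-equals scan (alternative decomposition, not claimed faster).

-- ===== PORT A =====
-- A counts the answers with collections.Counter (the 'ans is not None' filter is vacuous: every element of a List String is a
-- string) and reads the maximal count off most_common(1)[0][1]; most_common sorts the items by count descending, stably, so
-- its first element is the first item of maximal count — PySem.List.max? returns exactly the first extremal element.
def check_lcv_condition (answers : List String) (n_solutions : Int) : Bool :=
  if answers = [] then true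
  else
    let answer_counts := PySem.Dict.counter answers
    if answer_counts.items = [] then true
    else
      match PySem.List.max? answer_counts.items (fun p => p.2) with
      | none => true   -- unreachable: items ≠ [] here (guarded by the branch above, exactly as in the Python)
      | some p => decide (p.2 < PySem.Int.floordiv (n_solutions + 1) 2)

-- ===== PORT B =====
def check_lcv_condition_alt (answers : List String) (n_solutions : Int) : Bool :=
  if answers = [] then true
  else
    let vals := PySem.List.sorted answers (fun x => x) false
    let st := (vals.zip vals.tail).foldl
      (fun (st : Int × Int) (pc : String × String) =>
        let run := if pc.2 == pc.1 then st.1 + 1 else 1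
        (run, if run > st.2 then run else st.2)) (1, 1)
    decide (st.2 < PySem.Int.floordiv (n_solutions + 1) 2)

-- ===== PRECONDITION & SPEC =====
def Spec_check_lcv_condition (answers : List String) (n_solutions : Int) (out : Bool) : Prop := out = check_lcv_condition_alt answers n_solutions
instance (answers : List String) (n_solutions : Int) (out : Bool) : Decidable (Spec_check_lcv_condition answers n_solutions out) := by unfold Spec_check_lcv_condition; infer_instance

-- ===== CLAIM (what is proved, stated in full; the proofs are below) =====
def Claim_equal_check_lcv_condition : Prop := ∀ (answers : List String) (n_solutions : Int), Dom_check_lcv_condition answers n_solutions → Spec_check_lcv_condition answers n_solutions (check_lcv_condition answers n_solutions)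

-- ===== LEMMAS AND PROOFS =====


def lcvStep (st : Int × Int) (pc : String × String) : Int × Int :=
  ((if pc.2 == pc.1 then st.1 + 1 else 1),
   if (if pc.2 == pc.1 then st.1 + 1 else 1) > st.2 then (if pc.2 == pc.1 then st.1 + 1 else 1) else st.2)

def lcvFold (vals : List String) : Int × Int := (vals.zip vals.tail).foldl lcvStep (1, 1)

theorem zip_tail_append_last (t : List String) (ht : t ≠ []) (y : String) :
    (t ++ [y]).zip (t ++ [y]).tail = t.zip t.tail ++ [(t.getLast ht, y)] := by
  induction t with
  | nil => exact absurd rfl ht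
  | cons a t ih =>
    cases t with
    | nil => simp
    | cons b t' =>
      have h2 : (b :: t') ≠ [] := by simp
      have hih := ih h2
      rw [List.getLast_cons h2]
      simp only [List.cons_append, List.tail_cons, List.zip_cons_cons] at hih ⊢
      rw [hih]

theorem mem_le_getLast (t : List String) (ht : t ≠ []) (hs : t.Pairwise (· ≤ ·))
    (v : String) (hv : v ∈ t) : v ≤ t.getLast ht := by
  rw [List.pairwise_iff_getElem] at hs
  obtain ⟨i, hi, rfl⟩ := List.mem_iff_getElem.mp hv
  rw [List.getLast_eq_getElem]
  by_cases h : i = t.length - 1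
  · subst h; exact le_rfl
  · exact hs i (t.length - 1) hi (by omega) (by omega)

theorem lcvFold_invariant (s : List String) (h : s ≠ []) (hs : s.Pairwise (· ≤ ·)) :
    (lcvFold s).1 = (s.count (s.getLast h) : Int) ∧
    (∃ v ∈ s, ((s.count v : Int) = (lcvFold s).2)) ∧
    (∀ v ∈ s, (s.count v : Int) ≤ (lcvFold s).2) := by
  induction s using List.reverseRecOn with
  | nil => exact absurd rfl h
  | append_singleton t y ih =>
    by_cases ht : t = []
    · subst ht
      simp [lcvFold]
    · have hst : t.Pairwise (· ≤ ·) := (List.pairwise_append.mp hs).1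
      have hty : ∀ v ∈ t, v ≤ y := fun v hv =>
        (List.pairwise_append.mp hs).2.2 v hv y (by simp)
      obtain ⟨hrun, ⟨w, hw, hweq⟩, hbound⟩ := ih ht hst
      have hlast : (t ++ [y]).getLast h = y := by simp
      have hfold : lcvFold (t ++ [y]) = lcvStep (lcvFold t) (t.getLast ht, y) := by
        unfold lcvFold
        rw [zip_tail_append_last t ht y, List.foldl_append]
        rfl
      by_cases hye : y = t.getLast ht
      · -- y extends the last run
        have hrun2 : (lcvFold t).1 = (t.count y : Int) := by rw [hrun, ← hye]
        have hbeq : (y == t.getLast ht) = true := beq_iff_eq.mpr hye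
        have hstep : lcvFold (t ++ [y]) =
            ((t.count y : Int) + 1,
             if (t.count y : Int) + 1 > (lcvFold t).2 then (t.count y : Int) + 1 else (lcvFold t).2) := by
          rw [hfold]
          simp only [lcvStep, hbeq, if_true, hrun2]
        have hcy : (t ++ [y]).count y = t.count y + 1 := by simp
        refine ⟨?_, ?_, ?_⟩
        · rw [hstep, hlast, hcy]; push_cast; ring
        · by_cases hgt : (t.count y : Int) + 1 > (lcvFold t).2
          · refine ⟨y, by simp, ?_⟩
            rw [hstep, hcy]
            simp [hgt]
          · have hwy : w ≠ y := by
              intro he; subst he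
              rw [hweq] at hgt; omega
            refine ⟨w, by simp [hw], ?_⟩
            rw [hstep]
            have hcnt : (t ++ [y]).count w = t.count w := by
              simp [List.count_append, Ne.symm hwy]
            rw [hcnt, hweq]
            simp [hgt]
        · intro v hv
          rw [hstep]
          by_cases hvy : v = y
          · subst hvy
            rw [hcy]
            have hb : (t.count v : Int) ≤ (lcvFold t).2 := by
              by_cases hvt : v ∈ t
              · exact hbound v hvt
              · have : t.count v = 0 := List.count_eq_zero.mpr hvt
                rw [this]
                rw [← hweq]
                have : 0 < t.count w := List.count_pos_iff.mpr hw
                push_cast; omega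
            split_ifs with hgt <;> push_cast <;> omega
          · have hvt : v ∈ t := by
              rcases List.mem_append.mp hv with h1 | h1
              · exact h1
              · exact absurd (by simpa using h1) hvy
            have hcnt : (t ++ [y]).count v = t.count v := by
              simp [List.count_append, Ne.symm hvy]
            rw [hcnt]
            have := hbound v hvt
            split_ifs with hgt <;> omega
      · -- y starts a fresh run; y does not occur in t
        have hynin : y ∉ t := by
          intro hyt
          exact hye (le_antisymm (mem_le_getLast t ht hst y hyt)
            (hty (t.getLast ht) (List.getLast_mem ht)))
        have hb1 : (1 : Int) ≤ (lcvFold t).2 := by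
          rw [← hweq]
          exact_mod_cast List.count_pos_iff.mpr hw
        have hbeq : (y == t.getLast ht) = false := by
          simp [hye]
        have hstep : lcvFold (t ++ [y]) = (1, (lcvFold t).2) := by
          rw [hfold]
          simp only [lcvStep, hbeq, Bool.false_eq_true, if_false]
          have hng : ¬ ((1 : Int) > (lcvFold t).2) := by omega
          simp [hng]
        have hcy0 : t.count y = 0 := List.count_eq_zero.mpr hynin
        refine ⟨?_, ?_, ?_⟩
        · rw [hstep, hlast]
          simp [List.count_append, hcy0]
        · have hwy : w ≠ y := fun he => hynin (he ▸ hw)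
          refine ⟨w, by simp [hw], ?_⟩
          rw [hstep]
          simp [List.count_append, Ne.symm hwy, hweq]
        · intro v hv
          rw [hstep]
          by_cases hvy : v = y
          · subst hvy
            simp [List.count_append, hcy0]
            omega
          · have hvt : v ∈ t := by
              rcases List.mem_append.mp hv with h1 | h1
              · exact h1
              · exact absurd (by simpa using h1) hvy
            have := hbound v hvt
            simp [List.count_append, Ne.symm hvy]
            omega

-- A's max? over the Counter items yields the maximal count over answers
theorem maxcount_A (answers : List String) (h : answers ≠ []) :
    ∃ p, PySem.List.max? (PySem.Dict.counter answers).items (fun q : String × Int => q.2) = some p ∧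
      (∃ v ∈ answers, (answers.count v : Int) = p.2) ∧
      (∀ v ∈ answers, (answers.count v : Int) ≤ p.2) := by
  have hitems : (PySem.Dict.counter answers).items
      = (PySem.Set.ofList answers).map (fun k => (k, (answers.count k : Int))) :=
    PySem.Dict.items_counter answers
  have hne : (PySem.Dict.counter answers).items ≠ [] := by
    rw [hitems]
    simp only [ne_eq, List.map_eq_nil_iff]
    intro hnil
    obtain ⟨a, ha⟩ := List.exists_mem_of_ne_nil answers h
    exact (List.eq_nil_iff_forall_not_mem.mp hnil a) ((PySem.Set.mem_ofList answers a).mpr ha)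
  obtain ⟨p, hp⟩ : ∃ p, PySem.List.max? (PySem.Dict.counter answers).items (fun q : String × Int => q.2) = some p := by
    cases he : PySem.List.max? (PySem.Dict.counter answers).items (fun q : String × Int => q.2) with
    | none => exact absurd ((PySem.List.max?_eq_none_iff _ _).mp he) hne
    | some p => exact ⟨p, rfl⟩
  refine ⟨p, hp, ?_, ?_⟩
  · have hmem := PySem.List.max?_mem hp
    rw [hitems] at hmem
    obtain ⟨k, hk, hkeq⟩ := List.mem_map.mp hmem
    exact ⟨k, (PySem.Set.mem_ofList answers k).mp hk, by rw [← hkeq]⟩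
  · intro v hv
    have hmax := PySem.List.max?_isMax hp
    have hvmem : (v, (answers.count v : Int)) ∈ (PySem.Dict.counter answers).items := by
      rw [hitems]
      exact List.mem_map.mpr ⟨v, (PySem.Set.mem_ofList answers v).mpr hv, rfl⟩
    exact hmax _ hvmem

-- ===== VERDICT (by name: the statement is the Claim_ definition above) =====
theorem check_lcv_condition_spec : Claim_equal_check_lcv_condition := by
  intro answers n_solutions _
  unfold Spec_check_lcv_condition check_lcv_condition check_lcv_condition_alt
  by_cases h : answers = []
  · simp [h]
  · simp only [h, if_false]
    obtain ⟨p, hp, ⟨v, hv, hveq⟩, hbound⟩ := maxcount_A answers h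
    have hitems_ne : ¬ (PySem.Dict.counter answers).items = [] := by
      intro he
      rw [(PySem.List.max?_eq_none_iff _ (fun q : String × Int => q.2)).mpr he] at hp
      simp at hp
    simp only [hitems_ne, if_false, hp]
    set vals := PySem.List.sorted answers (fun x => x) false with hvals
    have hperm : vals.Perm answers := PySem.List.sorted_perm answers (fun x => x) false
    have hvne : vals ≠ [] := by
      intro he
      exact h ((he ▸ hperm).symm.eq_nil)
    have hsorted : vals.Pairwise (· ≤ ·) := by
      have := PySem.List.sorted_pairwise answers (fun x => x)
      simpa using this
    obtain ⟨_, ⟨w, hw, hweq⟩, hbbound⟩ := lcvFold_invariant vals hvne hsorted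
    have hfold_eq : (vals.zip vals.tail).foldl
        (fun (st : Int × Int) (pc : String × String) =>
          let run := if pc.2 == pc.1 then st.1 + 1 else 1
          (run, if run > st.2 then run else st.2)) (1, 1) = lcvFold vals := rfl
    rw [hfold_eq]
    have hcounts : ∀ x, vals.count x = answers.count x := fun x => hperm.count_eq x
    have heq : p.2 = (lcvFold vals).2 := by
      apply le_antisymm
      · rw [← hveq, ← hcounts v]
        exact hbbound v (hperm.mem_iff.mpr hv)
      · rw [← hweq, hcounts w]
        exact hbound w (hperm.mem_iff.mp hw)
    rw [heq]
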